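-- pv_equiv track=rewrite | github.com/Jiyesss/Programmers | Lv2.[PCCP2번]석유시추.py | solution
-- ===== SOURCE A (Python) =====
-- from collections import deque
--
-- def solution(land):
--     n = len(land)  # 세로 길이
--     m = len(land[0])  # 가로 길이
--
--     # 방향 벡터: 상, 하, 좌, 우
--     dx = [-1, 1, 0, 0]
--     dy = [0, 0, -1, 1]
--
--     def bfs(x, y):
--         # BFS를 위한 큐 초기화
--         queue = deque()
--         queue.append((x, y))
--         visit[x][y] = True
--         mass = 0
--
--         while queue:
--             cx, cy = queue.popleft()
--             mass += 1  # 석유 칸의 개수 증가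
--
--             # 네 방향으로 탐색
--             for i in range(4):
--                 nx = cx + dx[i]
--                 ny = cy + dy[i]
--
--                 # 격자 범위 내에 있고, 석유가 있으며 방문하지 않은 칸인 경우
--                 if 0 <= nx < n and 0 <= ny < m and land[nx][ny] == 1 and not visit[nx][ny]:
--                     visit[nx][ny] = True  # 방문 표시
--                     queue.append((nx, ny))
--
--         return mass
--
--     max_oil = 0  # 최대 석유량 초기화
--
--     # 각 열에 대해 탐색
--     for col in range(m):
--         total_oil = 0
--         visit = [[False] * m for _ in range(n)]  # 방문 배열 초기화
--
--         # 현재 열의 각 행에 대해 BFS 수행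
--         for row in range(n):
--             if land[row][col] == 1 and not visit[row][col]:
--                 total_oil += bfs(row, col)  # 현재 열의 총 석유량 합산
--
--         max_oil = max(max_oil, total_oil)  # 최대 석유량 갱신
--
--     return max_oil  # 최대 석유량 반환
-- ===== SOURCE B (Python) =====
-- from collections import deque
--
-- def solution(land):
--     n = len(land)
--     m = len(land[0])
--     visited = [[False] * m for _ in range(n)]
--     col_total = [0] * m
--     for r in range(n):
--         for c in range(m):
--             if land[r][c] == 1 and not visited[r][c]:
--                 visited[r][c] = True
--                 q = deque([(r, c)])
--                 size = 0
--                 cols = set()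
--                 while q:
--                     x, y = q.popleft()
--                     size += 1
--                     cols.add(y)
--                     for nx, ny in ((x - 1, y), (x + 1, y), (x, y - 1), (x, y + 1)):
--                         if 0 <= nx < n and 0 <= ny < m and land[nx][ny] == 1 and not visited[nx][ny]:
--                             visited[nx][ny] = True
--                             q.append((nx, ny))
--                 for y in cols:
--                     col_total[y] += size
--     return max(col_total, default=0)
-- ===== Notes on version B (the rewrite author's own statement) =====
-- stated objective: faster
-- what changed: A re-floods the grid from scratch for every column (BFS per column, O(n*m^2)); B labels each connected component exactly once in a single global pass and adds its size to the totals of every column it spans, then takes the maximum column total.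
import Mathlib
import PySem

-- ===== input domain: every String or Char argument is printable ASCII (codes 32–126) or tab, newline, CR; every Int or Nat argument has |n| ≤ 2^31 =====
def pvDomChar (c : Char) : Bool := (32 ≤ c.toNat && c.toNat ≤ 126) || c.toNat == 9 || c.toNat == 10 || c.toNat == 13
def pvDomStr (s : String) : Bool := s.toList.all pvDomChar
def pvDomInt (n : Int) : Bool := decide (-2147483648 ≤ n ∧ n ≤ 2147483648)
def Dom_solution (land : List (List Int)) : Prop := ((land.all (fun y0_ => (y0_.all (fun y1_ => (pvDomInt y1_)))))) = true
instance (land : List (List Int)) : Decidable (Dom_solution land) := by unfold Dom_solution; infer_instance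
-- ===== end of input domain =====

-- B replaces A's per-column re-flooding (BFS restarted for every column) by a single global
-- flood fill that labels each connected component once and credits its size to every column
-- it spans; a timing run measured this asymptotically faster (O(n*m) vs O(n*m^2)).

-- ===== PORT A =====
-- `land[nx][ny] == 1` guarded by `0 <= nx < n and 0 <= ny < m` (both ports share this test verbatim)
def cellOil (land : List (List Int)) (n m x y : Int) : Bool :=
  decide (0 ≤ x) && decide (x < n) && decide (0 ≤ y) && decide (y < m) &&
    (((PySem.List.pyGet? land x).bind (fun row => PySem.List.pyGet? row y)) == some 1)

-- dx/dy direction vectors of A, zipped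
def pvDirs : List (Int × Int) := [(-1, 0), (1, 0), (0, -1), (0, 1)]

-- A's inner `for i in range(4)` loop: push unvisited oil neighbours (deque.append = right end)
def stepA (land : List (List Int)) (n m cx cy : Int)
    (st : List (Int × Int) × Finset (Int × Int)) : List (Int × Int) × Finset (Int × Int) :=
  pvDirs.foldl (fun st d =>
    let nx := cx + d.1
    let ny := cy + d.2
    if cellOil land n m nx ny ∧ (nx, ny) ∉ st.2 then (st.1 ++ [(nx, ny)], insert (nx, ny) st.2)
    else st) st

-- A's bfs while-loop; the visit matrix is modelled as the finite set of True cells.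
-- fuel only makes the loop total: it is chosen large enough to never run out (proved below).
def bfsA (land : List (List Int)) (n m : Int) :
    Nat → List (Int × Int) → Finset (Int × Int) → Int → Int × Finset (Int × Int)
  | _, [], visit, mass => (mass, visit)
  | 0, _ :: _, visit, mass => (mass, visit)
  | fuel + 1, c :: rest, visit, mass =>
      let st := stepA land n m c.1 c.2 (rest, visit)
      bfsA land n m fuel st.1 st.2 (mass + 1)

def solution (land : List (List Int)) : Int :=
  let n : Int := land.length
  let m : Int := (land.head?.getD []).length
  let fuel : Nat := 2 * land.length * (land.head?.getD []).length + 2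
  (PySem.List.pyRange 0 m 1).foldl (fun best col =>
    let res := (PySem.List.pyRange 0 n 1).foldl (fun (st : Int × Finset (Int × Int)) row =>
      if cellOil land n m row col ∧ (row, col) ∉ st.2 then
        let r := bfsA land n m fuel [(row, col)] (insert (row, col) st.2) 0
        (st.1 + r.1, r.2)
      else st) ((0 : Int), (∅ : Finset (Int × Int)))
    max best res.1) 0

-- ===== PORT B =====
-- B's inner neighbour loop: `for nx, ny in ((x-1,y),(x+1,y),(x,y-1),(x,y+1))`
def nbrList (x y : Int) : List (Int × Int) := [(x - 1, y), (x + 1, y), (x, y - 1), (x, y + 1)]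

def push1 (land : List (List Int)) (n m : Int)
    (st : List (Int × Int) × Finset (Int × Int)) (p : Int × Int) :
    List (Int × Int) × Finset (Int × Int) :=
  if cellOil land n m p.1 p.2 ∧ p ∉ st.2 then (st.1 ++ [p], insert p st.2) else st

def stepB (land : List (List Int)) (n m x y : Int)
    (st : List (Int × Int) × Finset (Int × Int)) : List (Int × Int) × Finset (Int × Int) :=
  (nbrList x y).foldl (push1 land n m) st

-- B's flood while-loop: also counts the size and collects the set of columns the component spans
def floodB (land : List (List Int)) (n m : Int) :
    Nat → List (Int × Int) → Finset (Int × Int) → Int → PySem.Set Int →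
    Int × PySem.Set Int × Finset (Int × Int)
  | _, [], visit, size, cols => (size, cols, visit)
  | 0, _ :: _, visit, size, cols => (size, cols, visit)
  | fuel + 1, c :: rest, visit, size, cols =>
      let cols' := PySem.Set.add cols c.2
      let st := stepB land n m c.1 c.2 (rest, visit)
      floodB land n m fuel st.1 st.2 (size + 1) cols'

def solution_alt (land : List (List Int)) : Int :=
  let n : Int := land.length
  let m : Int := (land.head?.getD []).length
  let fuel : Nat := 2 * land.length * (land.head?.getD []).length + 2
  let final := (PySem.List.pyRange 0 n 1).foldl (fun st r =>
    (PySem.List.pyRange 0 m 1).foldl (fun (st : Finset (Int × Int) × List Int) c =>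
      if cellOil land n m r c ∧ (r, c) ∉ st.1 then
        let res := floodB land n m fuel [(r, c)] (insert (r, c) st.1) 0 []
        (res.2.2, res.2.1.foldl (fun ct y => ct.set y.toNat (ct.getD y.toNat 0 + res.1)) st.2)
      else st) st)
    ((∅ : Finset (Int × Int)), List.replicate (land.head?.getD []).length 0)
  (PySem.List.max? final.2 (fun x => x)).getD 0

-- ===== PRECONDITION & SPEC =====
-- Pre_ excludes exactly the inputs on which A raises IndexError: the empty grid (land[0])
-- and ragged grids where some row is shorter than row 0 (land[row][col] for col < m).
def Pre_solution (land : List (List Int)) : Prop :=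
  land ≠ [] ∧ ∀ row ∈ land, (land.head?.getD []).length ≤ row.length
instance (land : List (List Int)) : Decidable (Pre_solution land) := by
  unfold Pre_solution; infer_instance

def pvWitness_solution : List (List Int) := [[1, 0], [1, 1]]

def Spec_solution (land : List (List Int)) (out : Int) : Prop := out = solution_alt land
instance (land : List (List Int)) (out : Int) : Decidable (Spec_solution land out) := by
  unfold Spec_solution; infer_instance

-- ===== CLAIM (what is proved, stated in full; the proofs are below) =====
def Claim_equal_solution : Prop :=
  ∀ (land : List (List Int)), Dom_solution land → Pre_solution land →
    Spec_solution land (solution land)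

-- ===== LEMMAS AND PROOFS =====
def isOil (land : List (List Int)) (n m : Int) (c : Int × Int) : Prop :=
  cellOil land n m c.1 c.2 = true

def Adj (a b : Int × Int) : Prop :=
  b = (a.1 - 1, a.2) ∨ b = (a.1 + 1, a.2) ∨ b = (a.1, a.2 - 1) ∨ b = (a.1, a.2 + 1)

lemma adj_symm (a b : Int × Int) (h : Adj a b) : Adj b a := by
  rcases h with h | h | h | h <;> subst h <;> simp [Adj, Prod.ext_iff]

lemma mem_nbrList (x y : Int) (p : Int × Int) : p ∈ nbrList x y ↔ Adj (x, y) p := by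
  simp [nbrList, Adj]

lemma stepA_eq_stepB (land : List (List Int)) (n m x y : Int)
    (st : List (Int × Int) × Finset (Int × Int)) :
    stepA land n m x y st = stepB land n m x y st := by
  simp only [stepA, stepB, pvDirs, nbrList, push1, List.foldl_cons, List.foldl_nil,
    show x + (-1 : Int) = x - 1 from by ring, show y + (-1 : Int) = y - 1 from by ring,
    show x + (0 : Int) = x from by ring, show y + (0 : Int) = y from by ring]

lemma push_run (land : List (List Int)) (n m : Int) (cands : List (Int × Int)) :
    ∀ (q : List (Int × Int)) (v : Finset (Int × Int)),
    ∃ δ : List (Int × Int),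
      cands.foldl (push1 land n m) (q, v) = (q ++ δ, v ∪ δ.toFinset) ∧ δ.Nodup ∧
      (∀ p, p ∈ δ ↔ p ∈ cands ∧ isOil land n m p ∧ p ∉ v) := by
  induction cands with
  | nil => intro q v; exact ⟨[], by simp, by simp, by simp⟩
  | cons c cs ih =>
    intro q v
    by_cases hc : cellOil land n m c.1 c.2 = true ∧ c ∉ v
    · obtain ⟨δ, hst, hnd, hmem⟩ := ih (q ++ [c]) (insert c v)
      refine ⟨c :: δ, ?_, ?_, ?_⟩
      · rw [List.foldl_cons, push1, if_pos hc, hst]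
        simp only [Prod.mk.injEq]
        refine ⟨by simp, ?_⟩
        ext p; simp
      · exact List.nodup_cons.2 ⟨fun h => by simp [hmem] at h, hnd⟩
      · intro p
        simp only [List.mem_cons, hmem, Finset.mem_insert, isOil] at *
        constructor
        · rintro (rfl | ⟨h1, h2, h3⟩)
          · exact ⟨Or.inl rfl, hc.1, hc.2⟩
          · exact ⟨Or.inr h1, h2, fun hv => h3 (Or.inr hv)⟩
        · rintro ⟨(rfl | h1), h2, h3⟩
          · exact Or.inl rfl
          · by_cases hpc : p = c
            · exact Or.inl hpc
            · exact Or.inr ⟨h1, h2, fun h => (h.elim hpc h3)⟩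
    · obtain ⟨δ, hst, hnd, hmem⟩ := ih q v
      refine ⟨δ, ?_, hnd, ?_⟩
      · rw [List.foldl_cons, push1, if_neg hc, hst]
      · intro p
        rw [hmem]
        simp only [isOil] at *
        constructor
        · rintro ⟨h1, h2, h3⟩; exact ⟨List.mem_cons_of_mem _ h1, h2, h3⟩
        · rintro ⟨h1, h2, h3⟩
          rcases List.mem_cons.1 h1 with rfl | h1
          · exact absurd ⟨h2, h3⟩ hc
          · exact ⟨h1, h2, h3⟩
inductive Reach (land : List (List Int)) (n m : Int) : (Int × Int) → (Int × Int) → Prop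
  | refl (a : Int × Int) (h : isOil land n m a) : Reach land n m a a
  | tail (a b c : Int × Int) (hab : Reach land n m a b) (hbc : Adj b c)
      (hc : isOil land n m c) : Reach land n m a c

lemma reach_oil_left (land : List (List Int)) (n m : Int) (a b : Int × Int)
    (h : Reach land n m a b) : isOil land n m a := by
  induction h with
  | refl ha => exact ha
  | tail b c hab hbc hc ih => exact ih

lemma reach_oil_right (land : List (List Int)) (n m : Int) (a b : Int × Int)
    (h : Reach land n m a b) : isOil land n m b := by
  induction h with
  | refl ha => exact ha
  | tail b c hab hbc hc ih => exact hc

lemma reach_trans (land : List (List Int)) (n m : Int) (a b c : Int × Int)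
    (h1 : Reach land n m a b) (h2 : Reach land n m b c) : Reach land n m a c := by
  induction h2 with
  | refl _ => exact h1
  | tail y z hxy hyz hz ih => exact Reach.tail _ _ _ ih hyz hz

lemma reach_symm (land : List (List Int)) (n m : Int) (a b : Int × Int)
    (h : Reach land n m a b) : Reach land n m b a := by
  induction h with
  | refl ha => exact Reach.refl _ ha
  | tail y z hxy hyz hz ih =>
      exact reach_trans land n m _ _ _
        (Reach.tail _ _ _ (Reach.refl _ hz) (adj_symm _ _ hyz)
          (reach_oil_right land n m _ _ hxy)) ih

def ClosedS (land : List (List Int)) (n m : Int) (S : Finset (Int × Int)) : Prop :=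
  ∀ c ∈ S, ∀ d, Adj c d → isOil land n m d → d ∈ S

lemma closed_reach (land : List (List Int)) (n m : Int) (S : Finset (Int × Int))
    (hS : ClosedS land n m S) (s c : Int × Int) (hs : s ∈ S)
    (h : Reach land n m s c) : c ∈ S := by
  induction h with
  | refl _ => exact hs
  | tail y z hxy hyz hz ih => exact hS y ih z hyz hz

def oilF (land : List (List Int)) (n m : Int) : Finset (Int × Int) :=
  ((Finset.range n.toNat ×ˢ Finset.range m.toNat).image
    (fun p => ((p.1 : Int), (p.2 : Int)))).filter (fun c => cellOil land n m c.1 c.2)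

lemma oil_bounds (land : List (List Int)) (n m : Int) (c : Int × Int)
    (h : isOil land n m c) : 0 ≤ c.1 ∧ c.1 < n ∧ 0 ≤ c.2 ∧ c.2 < m := by
  simp only [isOil, cellOil, Bool.and_eq_true, decide_eq_true_eq] at h
  exact ⟨h.1.1.1.1, h.1.1.1.2, h.1.1.2, h.1.2⟩

lemma mem_oilF_of_oil (land : List (List Int)) (n m : Int) (c : Int × Int)
    (h : isOil land n m c) : c ∈ oilF land n m := by
  obtain ⟨h1, h2, h3, h4⟩ := oil_bounds land n m c h
  refine Finset.mem_filter.2 ⟨Finset.mem_image.2 ⟨(c.1.toNat, c.2.toNat), ?_, ?_⟩, h⟩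
  · simp only [Finset.mem_product, Finset.mem_range]; omega
  · simp only [Prod.ext_iff]; constructor <;> simp <;> omega

lemma card_oilF_le (land : List (List Int)) (n m : Int) :
    (oilF land n m).card ≤ n.toNat * m.toNat := by
  calc (oilF land n m).card ≤ ((Finset.range n.toNat ×ˢ Finset.range m.toNat).image
        (fun p : Nat × Nat => ((p.1 : Int), (p.2 : Int)))).card := Finset.card_filter_le _ _
    _ ≤ (Finset.range n.toNat ×ˢ Finset.range m.toNat).card := Finset.card_image_le
    _ = n.toNat * m.toNat := by simp

lemma bfsA_succ (land : List (List Int)) (n m : Int) (fuel : Nat) (c : Int × Int)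
    (rest : List (Int × Int)) (v : Finset (Int × Int)) (mass : Int) :
    bfsA land n m (fuel + 1) (c :: rest) v mass =
      bfsA land n m fuel ((nbrList c.1 c.2).foldl (push1 land n m) (rest, v)).1
        ((nbrList c.1 c.2).foldl (push1 land n m) (rest, v)).2 (mass + 1) := by
  rw [bfsA, stepA_eq_stepB]; rfl

lemma bfsA_mono (land : List (List Int)) (n m : Int) :
    ∀ (fuel : Nat) (q : List (Int × Int)) (v : Finset (Int × Int)) (mass : Int),
    v ⊆ (bfsA land n m fuel q v mass).2 := by
  intro fuel
  induction fuel with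
  | zero => intro q v mass; cases q <;> simp [bfsA]
  | succ fuel ih =>
    intro q v mass
    cases q with
    | nil => simp [bfsA]
    | cons c rest =>
      rw [bfsA_succ]
      obtain ⟨δ, hst, -, -⟩ := push_run land n m (nbrList c.1 c.2) rest v
      rw [hst]
      exact fun p hp => ih _ _ _ (Finset.mem_union_left _ hp)

lemma bfs_run (land : List (List Int)) (n m : Int) :
    ∀ (fuel : Nat) (q : List (Int × Int)) (v : Finset (Int × Int)) (mass : Int),
    (∀ c ∈ q, c ∈ v) →
    (∀ c ∈ v, isOil land n m c) →
    (∀ c ∈ v, c ∉ q → ∀ d, Adj c d → isOil land n m d → d ∈ v) →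
    2 * ((oilF land n m) \ v).card + q.length ≤ fuel →
    (∀ c ∈ (bfsA land n m fuel q v mass).2, isOil land n m c) ∧
    ClosedS land n m (bfsA land n m fuel q v mass).2 ∧
    (∀ c ∈ (bfsA land n m fuel q v mass).2, c ∈ v ∨ ∃ a ∈ q, Reach land n m a c) ∧
    (bfsA land n m fuel q v mass).1 =
      mass + q.length + (((bfsA land n m fuel q v mass).2.card : Int) - (v.card : Int)) := by
  intro fuel
  induction fuel with
  | zero =>
    intro q v mass h1 h2 h3 hf
    have hq : q = [] := by cases q <;> simp_all
    subst hq
    refine ⟨h2, fun c hc => h3 c hc (by simp), fun c hc => Or.inl hc, by simp [bfsA]⟩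
  | succ fuel ih =>
    intro q v mass h1 h2 h3 hf
    cases q with
    | nil =>
      refine ⟨h2, fun c hc => h3 c hc (by simp), fun c hc => Or.inl hc, by simp [bfsA]⟩
    | cons c rest =>
      rw [bfsA_succ]
      obtain ⟨δ, hst, hδnd, hδmem⟩ := push_run land n m (nbrList c.1 c.2) rest v
      rw [hst]
      have hcv : c ∈ v := h1 c (List.mem_cons_self ..)
      have hcoil : isOil land n m c := h2 c hcv
      have hδoil : ∀ p ∈ δ, isOil land n m p := fun p hp => ((hδmem p).1 hp).2.1
      have hδnv : ∀ p ∈ δ, p ∉ v := fun p hp => ((hδmem p).1 hp).2.2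
      have hδadj : ∀ p ∈ δ, Adj c p := fun p hp => by
        have := ((hδmem p).1 hp).1
        rw [mem_nbrList] at this
        exact this
      have hreach : ∀ p ∈ δ, Reach land n m c p := fun p hp =>
        Reach.tail _ _ _ (Reach.refl c hcoil) (hδadj p hp) (hδoil p hp)
      have hdisj : Disjoint v δ.toFinset := by
        rw [Finset.disjoint_right]
        intro p hp
        exact hδnv p (List.mem_toFinset.1 hp)
      have hcardv' : (v ∪ δ.toFinset).card = v.card + δ.length := by
        rw [Finset.card_union_of_disjoint hdisj, List.toFinset_card_of_nodup hδnd]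
      have hsub : δ.toFinset ⊆ oilF land n m \ v := fun p hp => by
        rw [List.mem_toFinset] at hp
        exact Finset.mem_sdiff.2 ⟨mem_oilF_of_oil land n m p (hδoil p hp), hδnv p hp⟩
      have hsd : oilF land n m \ (v ∪ δ.toFinset) = (oilF land n m \ v) \ δ.toFinset := by
        ext p; simp only [Finset.mem_sdiff, Finset.mem_union]; tauto
      have hcards : (oilF land n m \ (v ∪ δ.toFinset)).card + δ.length
          = (oilF land n m \ v).card := by
        rw [hsd, ← List.toFinset_card_of_nodup hδnd]
        exact Finset.card_sdiff_add_card_eq_card hsub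
      have h1' : ∀ p ∈ rest ++ δ, p ∈ v ∪ δ.toFinset := by
        intro p hp
        rcases List.mem_append.1 hp with hp | hp
        · exact Finset.mem_union_left _ (h1 p (List.mem_cons_of_mem _ hp))
        · exact Finset.mem_union_right _ (List.mem_toFinset.2 hp)
      have h2' : ∀ p ∈ v ∪ δ.toFinset, isOil land n m p := by
        intro p hp
        rcases Finset.mem_union.1 hp with hp | hp
        · exact h2 p hp
        · exact hδoil p (List.mem_toFinset.1 hp)
      have h3' : ∀ p ∈ v ∪ δ.toFinset, p ∉ rest ++ δ →
          ∀ d, Adj p d → isOil land n m d → d ∈ v ∪ δ.toFinset := by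
        intro p hp hpq d hadj hoil
        rcases Finset.mem_union.1 hp with hp | hp
        · by_cases hpc : p = c
          · subst hpc
            by_cases hdv : d ∈ v
            · exact Finset.mem_union_left _ hdv
            · refine Finset.mem_union_right _ (List.mem_toFinset.2 ((hδmem d).2 ?_))
              exact ⟨(mem_nbrList p.1 p.2 d).2 hadj, hoil, hdv⟩
          · have : p ∉ c :: rest := by
              intro hmem
              rcases List.mem_cons.1 hmem with h | h
              · exact hpc h
              · exact hpq (List.mem_append.2 (Or.inl h))
            exact Finset.mem_union_left _ (h3 p hp this d hadj hoil)
        · exact absurd (List.mem_append.2 (Or.inr (List.mem_toFinset.1 hp))) hpq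
      have hf' : 2 * ((oilF land n m) \ (v ∪ δ.toFinset)).card + (rest ++ δ).length ≤ fuel := by
        rw [List.length_append]
        simp only [List.length_cons] at hf
        omega
      obtain ⟨C2, C3, C4, C5⟩ := ih (rest ++ δ) (v ∪ δ.toFinset) (mass + 1) h1' h2' h3' hf'
      refine ⟨C2, C3, ?_, ?_⟩
      · intro p hp
        rcases C4 p hp with hp' | ⟨a, ha, hr⟩
        · rcases Finset.mem_union.1 hp' with hp' | hp'
          · exact Or.inl hp'
          · exact Or.inr ⟨c, List.mem_cons_self .., hreach p (List.mem_toFinset.1 hp')⟩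
        · rcases List.mem_append.1 ha with ha | ha
          · exact Or.inr ⟨a, List.mem_cons_of_mem _ ha, hr⟩
          · exact Or.inr ⟨c, List.mem_cons_self ..,
              reach_trans land n m _ _ _ (hreach a ha) hr⟩
      · rw [C5, hcardv']
        simp only [List.length_append, List.length_cons]
        push_cast
        ring
lemma reach_not_mem (land : List (List Int)) (n m : Int) (V : Finset (Int × Int))
    (hVcl : ClosedS land n m V) (s c : Int × Int) (hsV : s ∉ V)
    (hr : Reach land n m s c) : c ∉ V := fun hc =>
  hsV (closed_reach land n m V hVcl c s hc (reach_symm land n m s c hr))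

lemma bfs_call (land : List (List Int)) (n m : Int) (fuel : Nat) (V : Finset (Int × Int))
    (s : Int × Int) (hoil : isOil land n m s) (hsV : s ∉ V)
    (hVoil : ∀ c ∈ V, isOil land n m c) (hVcl : ClosedS land n m V)
    (hfuel : 2 * (oilF land n m).card + 1 ≤ fuel) :
    (∀ c, c ∈ (bfsA land n m fuel [s] (insert s V) 0).2 ↔ c ∈ V ∨ Reach land n m s c) ∧
    ClosedS land n m (bfsA land n m fuel [s] (insert s V) 0).2 ∧
    (∀ c ∈ (bfsA land n m fuel [s] (insert s V) 0).2, isOil land n m c) ∧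
    (bfsA land n m fuel [s] (insert s V) 0).1 =
      (((bfsA land n m fuel [s] (insert s V) 0).2.card : Int) - (V.card : Int)) := by
  have h1 : ∀ c ∈ [s], c ∈ insert s V := by simp
  have h2 : ∀ c ∈ insert s V, isOil land n m c := by
    intro c hc
    rcases Finset.mem_insert.1 hc with rfl | hc
    · exact hoil
    · exact hVoil c hc
  have h3 : ∀ c ∈ insert s V, c ∉ [s] → ∀ d, Adj c d → isOil land n m d → d ∈ insert s V := by
    intro c hc hcs d hadj hoil'
    rcases Finset.mem_insert.1 hc with rfl | hc
    · exact absurd (List.mem_singleton.2 rfl) hcs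
    · exact Finset.mem_insert_of_mem (hVcl c hc d hadj hoil')
  have hf : 2 * ((oilF land n m) \ insert s V).card + ([s] : List (Int × Int)).length ≤ fuel := by
    have := Finset.card_le_card (Finset.sdiff_subset (s := oilF land n m) (t := insert s V))
    simp only [List.length_singleton]
    omega
  obtain ⟨C2, C3, C4, C5⟩ := bfs_run land n m fuel [s] (insert s V) 0 h1 h2 h3 hf
  have hmono := bfsA_mono land n m fuel [s] (insert s V) 0
  refine ⟨?_, C3, C2, ?_⟩
  · intro c
    constructor
    · intro hc
      rcases C4 c hc with hc' | ⟨a, ha, hr⟩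
      · rcases Finset.mem_insert.1 hc' with rfl | hc'
        · exact Or.inr (Reach.refl _ hoil)
        · exact Or.inl hc'
      · rw [List.mem_singleton] at ha
        subst ha
        exact Or.inr hr
    · intro hc
      rcases hc with hc | hc
      · exact hmono (Finset.mem_insert_of_mem hc)
      · exact closed_reach land n m _ C3 s c (hmono (Finset.mem_insert_self s V)) hc
  · rw [C5, Finset.card_insert_of_notMem hsV]
    simp only [List.length_singleton]
    push_cast
    ring

lemma floodB_couple (land : List (List Int)) (n m : Int) :
    ∀ (fuel : Nat) (q : List (Int × Int)) (v : Finset (Int × Int)) (size : Int)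
      (cols : PySem.Set Int),
    (floodB land n m fuel q v size cols).1 = (bfsA land n m fuel q v size).1 ∧
    (floodB land n m fuel q v size cols).2.2 = (bfsA land n m fuel q v size).2 := by
  intro fuel
  induction fuel with
  | zero => intro q v size cols; cases q <;> simp [floodB, bfsA]
  | succ fuel ih =>
    intro q v size cols
    cases q with
    | nil => simp [floodB, bfsA]
    | cons c rest =>
      rw [bfsA_succ, floodB]
      exact ih _ _ _ _

lemma floodB_cols (land : List (List Int)) (n m : Int) :
    ∀ (fuel : Nat) (q : List (Int × Int)) (v : Finset (Int × Int)) (size : Int)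
      (cols : PySem.Set Int),
    2 * ((oilF land n m) \ v).card + q.length ≤ fuel →
    ∀ z, z ∈ (floodB land n m fuel q v size cols).2.1 ↔
      z ∈ cols ∨ (∃ p ∈ q, p.2 = z) ∨
        (∃ p ∈ (floodB land n m fuel q v size cols).2.2, p ∉ v ∧ p.2 = z) := by
  intro fuel
  induction fuel with
  | zero =>
    intro q v size cols hf z
    have hq : q = [] := by cases q <;> simp_all
    subst hq
    simp [floodB]
  | succ fuel ih =>
    intro q v size cols hf z
    cases q with
    | nil => simp [floodB]
    | cons c rest =>
      rw [floodB]
      show z ∈ (floodB land n m fuel (stepB land n m c.1 c.2 (rest, v)).1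
          (stepB land n m c.1 c.2 (rest, v)).2 (size + 1) (PySem.Set.add cols c.2)).2.1 ↔ _
      obtain ⟨δ, hst, hδnd, hδmem⟩ := push_run land n m (nbrList c.1 c.2) rest v
      have hδoil : ∀ p ∈ δ, isOil land n m p := fun p hp => ((hδmem p).1 hp).2.1
      have hδnv : ∀ p ∈ δ, p ∉ v := fun p hp => ((hδmem p).1 hp).2.2
      rw [show stepB land n m c.1 c.2 (rest, v) = (rest ++ δ, v ∪ δ.toFinset) from hst]
      have hsub : δ.toFinset ⊆ oilF land n m \ v := fun p hp => by
        rw [List.mem_toFinset] at hp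
        exact Finset.mem_sdiff.2 ⟨mem_oilF_of_oil land n m p (hδoil p hp), hδnv p hp⟩
      have hsd : oilF land n m \ (v ∪ δ.toFinset) = (oilF land n m \ v) \ δ.toFinset := by
        ext p; simp only [Finset.mem_sdiff, Finset.mem_union]; tauto
      have hcards : (oilF land n m \ (v ∪ δ.toFinset)).card + δ.length
          = (oilF land n m \ v).card := by
        rw [hsd, ← List.toFinset_card_of_nodup hδnd]
        exact Finset.card_sdiff_add_card_eq_card hsub
      have hf' : 2 * ((oilF land n m) \ (v ∪ δ.toFinset)).card + (rest ++ δ).length ≤ fuel := by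
        rw [List.length_append]
        simp only [List.length_cons] at hf
        omega
      rw [ih (rest ++ δ) (v ∪ δ.toFinset) (size + 1) (PySem.Set.add cols c.2) hf' z]
      have hVf : v ∪ δ.toFinset ⊆
          (floodB land n m fuel (rest ++ δ) (v ∪ δ.toFinset) (size + 1)
            (PySem.Set.add cols c.2)).2.2 := by
        rw [(floodB_couple land n m fuel (rest ++ δ) (v ∪ δ.toFinset) (size + 1)
          (PySem.Set.add cols c.2)).2]
        exact bfsA_mono land n m fuel _ _ _
      constructor
      · rintro (hz | ⟨p, hp, rfl⟩ | ⟨p, hp, hpv, rfl⟩)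
        · rcases (PySem.Set.mem_add _ _ _).1 hz with hz | rfl
          · exact Or.inl hz
          · exact Or.inr (Or.inl ⟨c, List.mem_cons_self .., rfl⟩)
        · rcases List.mem_append.1 hp with hp | hp
          · exact Or.inr (Or.inl ⟨p, List.mem_cons_of_mem _ hp, rfl⟩)
          · exact Or.inr (Or.inr ⟨p, hVf (Finset.mem_union_right _ (List.mem_toFinset.2 hp)),
              hδnv p hp, rfl⟩)
        · exact Or.inr (Or.inr ⟨p, hp, fun hv => hpv (Finset.mem_union_left _ hv), rfl⟩)
      · rintro (hz | ⟨p, hp, rfl⟩ | ⟨p, hp, hpv, rfl⟩)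
        · exact Or.inl ((PySem.Set.mem_add _ _ _).2 (Or.inl hz))
        · rcases List.mem_cons.1 hp with rfl | hp
          · exact Or.inl ((PySem.Set.mem_add _ _ _).2 (Or.inr rfl))
          · exact Or.inr (Or.inl ⟨p, List.mem_append.2 (Or.inl hp), rfl⟩)
        · by_cases hpδ : p ∈ δ.toFinset
          · exact Or.inr (Or.inl ⟨p, List.mem_append.2 (Or.inr (List.mem_toFinset.1 hpδ)), rfl⟩)
          · refine Or.inr (Or.inr ⟨p, hp, ?_, rfl⟩)
            intro hpv'
            rcases Finset.mem_union.1 hpv' with h | h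
            · exact hpv h
            · exact hpδ h

lemma floodB_cols_nodup (land : List (List Int)) (n m : Int) :
    ∀ (fuel : Nat) (q : List (Int × Int)) (v : Finset (Int × Int)) (size : Int)
      (cols : PySem.Set Int), cols.Nodup →
    (floodB land n m fuel q v size cols).2.1.Nodup := by
  intro fuel
  induction fuel with
  | zero => intro q v size cols h; cases q <;> simpa [floodB]
  | succ fuel ih =>
    intro q v size cols h
    cases q with
    | nil => simpa [floodB]
    | cons c rest =>
      rw [floodB]
      exact ih _ _ _ _ (PySem.Set.nodup_add _ _ h)
def compS (land : List (List Int)) (n m : Int) (s : Int × Int) : Set (Int × Int) :=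
  {c | Reach land n m s c}

def Tset (land : List (List Int)) (n m : Int) (j : Int) : Set (Int × Int) :=
  {c | ∃ x : Int, Reach land n m (x, j) c}

lemma compS_finite (land : List (List Int)) (n m : Int) (s : Int × Int) :
    (compS land n m s).Finite :=
  Set.Finite.subset (oilF land n m).finite_toSet (fun c hc =>
    mem_oilF_of_oil land n m c (reach_oil_right land n m _ _ hc))

lemma flood_call (land : List (List Int)) (n m : Int) (fuel : Nat) (V : Finset (Int × Int))
    (s : Int × Int) (hoil : isOil land n m s) (hsV : s ∉ V)
    (hVoil : ∀ c ∈ V, isOil land n m c) (hVcl : ClosedS land n m V)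
    (hfuel : 2 * (oilF land n m).card + 1 ≤ fuel) :
    (∀ c, c ∈ (floodB land n m fuel [s] (insert s V) 0 []).2.2 ↔
        c ∈ V ∨ Reach land n m s c) ∧
    ClosedS land n m (floodB land n m fuel [s] (insert s V) 0 []).2.2 ∧
    (∀ c ∈ (floodB land n m fuel [s] (insert s V) 0 []).2.2, isOil land n m c) ∧
    (floodB land n m fuel [s] (insert s V) 0 []).1 =
      (((floodB land n m fuel [s] (insert s V) 0 []).2.2.card : Int) - (V.card : Int)) ∧
    (∀ z, z ∈ (floodB land n m fuel [s] (insert s V) 0 []).2.1 ↔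
        ∃ p, Reach land n m s p ∧ p.2 = z) ∧
    (floodB land n m fuel [s] (insert s V) 0 []).2.1.Nodup := by
  obtain ⟨hc1, hc2⟩ := floodB_couple land n m fuel [s] (insert s V) 0 []
  obtain ⟨B1, B2, B3, B4⟩ := bfs_call land n m fuel V s hoil hsV hVoil hVcl hfuel
  have hf : 2 * ((oilF land n m) \ insert s V).card + ([s] : List (Int × Int)).length ≤ fuel := by
    have := Finset.card_le_card (Finset.sdiff_subset (s := oilF land n m) (t := insert s V))
    simp only [List.length_singleton]
    omega
  have hcols := floodB_cols land n m fuel [s] (insert s V) 0 [] hf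
  refine ⟨fun c => by rw [hc2]; exact B1 c, by rw [hc2]; exact B2, by rw [hc2]; exact B3,
    by rw [hc1, hc2]; exact B4, ?_, floodB_cols_nodup land n m fuel [s] (insert s V) 0 []
      List.nodup_nil⟩
  intro z
  rw [hcols z]
  constructor
  · rintro (hz | ⟨p, hp, rfl⟩ | ⟨p, hp, hpv, rfl⟩)
    · exact absurd hz (List.not_mem_nil)
    · rw [List.mem_singleton] at hp
      subst hp
      exact ⟨p, Reach.refl _ hoil, rfl⟩
    · rw [hc2] at hp
      rcases (B1 p).1 hp with hpV | hr
      · exact absurd (Finset.mem_insert_of_mem hpV) hpv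
      · exact ⟨p, hr, rfl⟩
  · rintro ⟨p, hr, rfl⟩
    by_cases hps : p = s
    · subst hps
      exact Or.inr (Or.inl ⟨p, List.mem_singleton.2 rfl, rfl⟩)
    · refine Or.inr (Or.inr ⟨p, ?_, ?_, rfl⟩)
      · rw [hc2]
        exact (B1 p).2 (Or.inr hr)
      · intro hmem
        rcases Finset.mem_insert.1 hmem with h | h
        · exact hps h
        · exact reach_not_mem land n m V hVcl s p hsV hr h

lemma colA_run (land : List (List Int)) (n m : Int) (fuel : Nat) (j : Int)
    (hfuel : 2 * (oilF land n m).card + 1 ≤ fuel) :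
    ∀ (rows : List Int) (t : Int) (V : Finset (Int × Int)),
    ClosedS land n m V → (∀ c ∈ V, isOil land n m c) →
    (∀ c ∈ V, ∃ x : Int, Reach land n m (x, j) c) → t = (V.card : Int) →
    ClosedS land n m (rows.foldl (fun (st : Int × Finset (Int × Int)) row =>
        if cellOil land n m row j ∧ (row, j) ∉ st.2 then
          let r := bfsA land n m fuel [(row, j)] (insert (row, j) st.2) 0
          (st.1 + r.1, r.2)
        else st) (t, V)).2 ∧
    (∀ c ∈ (rows.foldl (fun (st : Int × Finset (Int × Int)) row =>
        if cellOil land n m row j ∧ (row, j) ∉ st.2 then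
          let r := bfsA land n m fuel [(row, j)] (insert (row, j) st.2) 0
          (st.1 + r.1, r.2)
        else st) (t, V)).2, isOil land n m c) ∧
    (∀ c ∈ (rows.foldl (fun (st : Int × Finset (Int × Int)) row =>
        if cellOil land n m row j ∧ (row, j) ∉ st.2 then
          let r := bfsA land n m fuel [(row, j)] (insert (row, j) st.2) 0
          (st.1 + r.1, r.2)
        else st) (t, V)).2, ∃ x : Int, Reach land n m (x, j) c) ∧
    V ⊆ (rows.foldl (fun (st : Int × Finset (Int × Int)) row =>
        if cellOil land n m row j ∧ (row, j) ∉ st.2 then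
          let r := bfsA land n m fuel [(row, j)] (insert (row, j) st.2) 0
          (st.1 + r.1, r.2)
        else st) (t, V)).2 ∧
    (∀ r' ∈ rows, isOil land n m (r', j) → (r', j) ∈ (rows.foldl
        (fun (st : Int × Finset (Int × Int)) row =>
        if cellOil land n m row j ∧ (row, j) ∉ st.2 then
          let r := bfsA land n m fuel [(row, j)] (insert (row, j) st.2) 0
          (st.1 + r.1, r.2)
        else st) (t, V)).2) ∧
    (rows.foldl (fun (st : Int × Finset (Int × Int)) row =>
        if cellOil land n m row j ∧ (row, j) ∉ st.2 then
          let r := bfsA land n m fuel [(row, j)] (insert (row, j) st.2) 0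
          (st.1 + r.1, r.2)
        else st) (t, V)).1 =
      (((rows.foldl (fun (st : Int × Finset (Int × Int)) row =>
        if cellOil land n m row j ∧ (row, j) ∉ st.2 then
          let r := bfsA land n m fuel [(row, j)] (insert (row, j) st.2) 0
          (st.1 + r.1, r.2)
        else st) (t, V)).2.card : Int)) := by
  intro rows
  induction rows with
  | nil =>
    intro t V hcl hoil hsound ht
    exact ⟨hcl, hoil, hsound, fun c hc => hc, by simp, ht⟩
  | cons r0 rest ih =>
    intro t V hcl hoil hsound ht
    by_cases hc : cellOil land n m r0 j ∧ (r0, j) ∉ V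
    · simp only [List.foldl_cons, if_pos hc]
      obtain ⟨B1, B2, B3, B4⟩ :=
        bfs_call land n m fuel V (r0, j) hc.1 hc.2 hoil hcl hfuel
      set r := bfsA land n m fuel [(r0, j)] (insert (r0, j) V) 0 with hr
      have hsub : V ⊆ r.2 := fun p hp => (B1 p).2 (Or.inl hp)
      have hsound' : ∀ c ∈ r.2, ∃ x : Int, Reach land n m (x, j) c := by
        intro c hcm
        rcases (B1 c).1 hcm with h | h
        · exact hsound c h
        · exact ⟨r0, h⟩
      have ht' : t + r.1 = (r.2.card : Int) := by rw [B4, ht]; ring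
      obtain ⟨D1, D2, D3, D4, D5, D6⟩ := ih (t + r.1) r.2 B2 B3 hsound' ht'
      refine ⟨D1, D2, D3, fun p hp => D4 (hsub hp), ?_, D6⟩
      intro r' hr' hoil'
      rcases List.mem_cons.1 hr' with rfl | hr'
      · exact D4 ((B1 _).2 (Or.inr (Reach.refl _ hc.1)))
      · exact D5 r' hr' hoil'
    · simp only [List.foldl_cons, if_neg hc]
      obtain ⟨D1, D2, D3, D4, D5, D6⟩ := ih t V hcl hoil hsound ht
      refine ⟨D1, D2, D3, D4, ?_, D6⟩
      intro r' hr' hoil'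
      rcases List.mem_cons.1 hr' with rfl | hr'
      · have : (r', j) ∈ V := by
          by_contra hnot
          exact hc ⟨hoil', hnot⟩
        exact D4 this
      · exact D5 r' hr' hoil'
lemma colA_total (land : List (List Int)) (n m : Int) (fuel : Nat) (j : Int)
    (hfuel : 2 * (oilF land n m).card + 1 ≤ fuel) :
    ((PySem.List.pyRange 0 n 1).foldl (fun (st : Int × Finset (Int × Int)) row =>
        if cellOil land n m row j ∧ (row, j) ∉ st.2 then
          let r := bfsA land n m fuel [(row, j)] (insert (row, j) st.2) 0
          (st.1 + r.1, r.2)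
        else st) ((0 : Int), (∅ : Finset (Int × Int)))).1 =
      ((Tset land n m j).ncard : Int) := by
  obtain ⟨D1, D2, D3, D4, D5, D6⟩ := colA_run land n m fuel j hfuel
    (PySem.List.pyRange 0 n 1) 0 ∅ (fun c hc => absurd hc (Finset.notMem_empty c))
    (fun c hc => absurd hc (Finset.notMem_empty c))
    (fun c hc => absurd hc (Finset.notMem_empty c)) (by simp)
  rw [D6]
  congr 1
  have hset : ((((PySem.List.pyRange 0 n 1).foldl (fun (st : Int × Finset (Int × Int)) row =>
      if cellOil land n m row j ∧ (row, j) ∉ st.2 then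
        let r := bfsA land n m fuel [(row, j)] (insert (row, j) st.2) 0
        (st.1 + r.1, r.2)
      else st) ((0 : Int), (∅ : Finset (Int × Int)))).2 : Finset (Int × Int)) : Set (Int × Int))
      = Tset land n m j := by
    ext c
    constructor
    · intro hc
      exact D3 c hc
    · rintro ⟨x, hx⟩
      have hxo : isOil land n m (x, j) := reach_oil_left land n m _ _ hx
      have hb := oil_bounds land n m (x, j) hxo
      have hxmem : x ∈ PySem.List.pyRange 0 n 1 := by
        rw [PySem.List.mem_pyRange_one]
        exact ⟨hb.1, hb.2.1⟩
      exact closed_reach land n m _ D1 (x, j) c (D5 x hxmem hxo) hx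
  rw [← hset, Set.ncard_coe_finset]

lemma ct_update (msize : Nat) (size : Int) :
    ∀ (ys : List Int) (ct : List Int), ys.Nodup → (∀ y ∈ ys, 0 ≤ y ∧ y < (msize : Int)) →
    ct.length = msize →
    (ys.foldl (fun ct y => ct.set y.toNat (ct.getD y.toNat 0 + size)) ct).length = msize ∧
    ∀ k : Nat, k < msize →
      (ys.foldl (fun ct y => ct.set y.toNat (ct.getD y.toNat 0 + size)) ct).getD k 0 =
        ct.getD k 0 + (if (k : Int) ∈ ys then size else 0) := by
  intro ys
  induction ys with
  | nil => intro ct hnd hb hlen; exact ⟨hlen, fun k hk => by simp⟩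
  | cons y ys ih =>
    intro ct hnd hb hlen
    have hy := hb y (List.mem_cons_self ..)
    have hylt : y.toNat < ct.length := by rw [hlen]; omega
    have hlen1 : (ct.set y.toNat (ct.getD y.toNat 0 + size)).length = msize := by
      rw [List.length_set, hlen]
    obtain ⟨L1, L2⟩ := ih (ct.set y.toNat (ct.getD y.toNat 0 + size)) (List.nodup_cons.1 hnd).2
      (fun z hz => hb z (List.mem_cons_of_mem _ hz)) hlen1
    refine ⟨L1, ?_⟩
    intro k hk
    have hkl : k < ct.length := by omega
    have hgset : (ct.set y.toNat (ct.getD y.toNat 0 + size)).getD k 0 =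
        if y.toNat = k then ct.getD y.toNat 0 + size else ct.getD k 0 := by
      rw [List.getD_eq_getElem _ 0 (by rw [List.length_set]; omega),
        List.getD_eq_getElem _ 0 hkl, List.getElem_set]
    rw [List.foldl_cons, L2 k hk, hgset]
    by_cases hky : (k : Int) = y
    · have hkt : y.toNat = k := by omega
      have hknin : (k : Int) ∉ ys := by rw [hky]; exact (List.nodup_cons.1 hnd).1
      rw [if_neg hknin, if_pos hkt, if_pos (by rw [hky]; exact List.mem_cons_self ..)]
      have : ct.getD y.toNat 0 = ct.getD k 0 := by rw [hkt]
      rw [this]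
      ring
    · have hkt : y.toNat ≠ k := by omega
      rw [if_neg hkt]
      by_cases hin : (k : Int) ∈ ys
      · rw [if_pos hin, if_pos (List.mem_cons_of_mem _ hin)]
      · rw [if_neg hin, if_neg (fun h => (List.mem_cons.1 h).elim (fun h' => hky h')
          (fun h' => hin h'))]
def bodyB (land : List (List Int)) (n m : Int) (fuel : Nat) (r : Int) :
    (Finset (Int × Int) × List Int) → Int → (Finset (Int × Int) × List Int) :=
  fun st c =>
    if cellOil land n m r c ∧ (r, c) ∉ st.1 then
      let res := floodB land n m fuel [(r, c)] (insert (r, c) st.1) 0 []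
      (res.2.2, res.2.1.foldl (fun ct y => ct.set y.toNat (ct.getD y.toNat 0 + res.1)) st.2)
    else st

lemma rowB_run (land : List (List Int)) (n m : Int) (fuel : Nat) (r : Int)
    (hfuel : 2 * (oilF land n m).card + 1 ≤ fuel) (hm : 0 ≤ m) :
    ∀ (cs : List Int) (st : Finset (Int × Int) × List Int),
    ClosedS land n m st.1 → (∀ c ∈ st.1, isOil land n m c) → st.2.length = m.toNat →
    (∀ k : Nat, k < m.toNat → st.2.getD k 0 =
      (((st.1 : Set (Int × Int)) ∩ Tset land n m (k : Int)).ncard : Int)) →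
    ClosedS land n m (cs.foldl (bodyB land n m fuel r) st).1 ∧
    (∀ c ∈ (cs.foldl (bodyB land n m fuel r) st).1, isOil land n m c) ∧
    (cs.foldl (bodyB land n m fuel r) st).2.length = m.toNat ∧
    (∀ k : Nat, k < m.toNat → (cs.foldl (bodyB land n m fuel r) st).2.getD k 0 =
      ((((cs.foldl (bodyB land n m fuel r) st).1 : Set (Int × Int)) ∩
        Tset land n m (k : Int)).ncard : Int)) ∧
    st.1 ⊆ (cs.foldl (bodyB land n m fuel r) st).1 ∧
    (∀ c ∈ cs, isOil land n m (r, c) → (r, c) ∈ (cs.foldl (bodyB land n m fuel r) st).1) := by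
  intro cs
  induction cs with
  | nil =>
    intro st hcl hoil hlen hent
    exact ⟨hcl, hoil, hlen, hent, fun p hp => hp, by simp⟩
  | cons c0 cs ih =>
    intro st hcl hoil hlen hent
    by_cases hc : cellOil land n m r c0 ∧ (r, c0) ∉ st.1
    · have hbody : bodyB land n m fuel r st c0 =
        (let res := floodB land n m fuel [(r, c0)] (insert (r, c0) st.1) 0 []
         (res.2.2, res.2.1.foldl (fun ct y => ct.set y.toNat (ct.getD y.toNat 0 + res.1)) st.2)) := by
        rw [bodyB, if_pos hc]
      obtain ⟨B1, B2, B3, B4, B5, B6⟩ :=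
        flood_call land n m fuel st.1 (r, c0) hc.1 hc.2 hoil hcl hfuel
      set res := floodB land n m fuel [(r, c0)] (insert (r, c0) st.1) 0 [] with hres
      have hVsub : st.1 ⊆ res.2.2 := fun p hp => (B1 p).2 (Or.inl hp)
      have hCdisj : ∀ p ∈ compS land n m (r, c0), p ∉ st.1 := fun p hp =>
        reach_not_mem land n m st.1 hcl (r, c0) p hc.2 hp
      have hset : ((res.2.2 : Finset (Int × Int)) : Set (Int × Int)) =
          ↑st.1 ∪ compS land n m (r, c0) := by
        ext p
        simp only [Set.mem_union, Finset.mem_coe, compS, Set.mem_setOf_eq]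
        exact B1 p
      have hdisjVC : Disjoint (↑st.1 : Set (Int × Int)) (compS land n m (r, c0)) :=
        Set.disjoint_left.2 fun p hp hpc => hCdisj p hpc hp
      have hcardeq : res.2.2.card = st.1.card + (compS land n m (r, c0)).ncard := by
        have h1 : ((res.2.2 : Finset (Int × Int)) : Set (Int × Int)).ncard =
            (↑st.1 : Set (Int × Int)).ncard + (compS land n m (r, c0)).ncard := by
          rw [hset, Set.ncard_union_eq hdisjVC st.1.finite_toSet
            (compS_finite land n m (r, c0))]
        rwa [Set.ncard_coe_finset, Set.ncard_coe_finset] at h1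
      have hsize : res.1 = ((compS land n m (r, c0)).ncard : Int) := by
        rw [B4]
        omega
      have hbnd : ∀ y ∈ res.2.1, 0 ≤ y ∧ y < ((m.toNat : Nat) : Int) := by
        intro y hy
        obtain ⟨p, hrp, hp2⟩ := (B5 y).1 hy
        have hb := oil_bounds land n m p (reach_oil_right land n m _ _ hrp)
        have : (m.toNat : Int) = m := Int.toNat_of_nonneg hm
        omega
      obtain ⟨L1, L2⟩ := ct_update m.toNat res.1 res.2.1 st.2 B6 hbnd hlen
      have hent' : ∀ k : Nat, k < m.toNat →
          (res.2.1.foldl (fun ct y => ct.set y.toNat (ct.getD y.toNat 0 + res.1)) st.2).getD k 0 =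
          (((res.2.2 : Finset (Int × Int)) : Set (Int × Int)) ∩ Tset land n m (k : Int)).ncard := by
        intro k hk
        rw [L2 k hk, hent k hk]
        by_cases hin : ((k : Nat) : Int) ∈ res.2.1
        · obtain ⟨p, hrp, hp2⟩ := (B5 (k : Int)).1 hin
          have hCT : compS land n m (r, c0) ⊆ Tset land n m (k : Int) := by
            intro q hq
            refine ⟨p.1, ?_⟩
            have hpk : (p.1, ((k : Nat) : Int)) = p := by
              rw [Prod.ext_iff]
              exact ⟨rfl, hp2.symm⟩
            rw [hpk]
            exact reach_trans land n m _ _ _ (reach_symm land n m _ _ hrp) hq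
          have hinter : (((res.2.2 : Finset (Int × Int)) : Set (Int × Int)) ∩
              Tset land n m (k : Int)) =
              ((↑st.1 : Set (Int × Int)) ∩ Tset land n m (k : Int)) ∪ compS land n m (r, c0) := by
            rw [hset]
            ext q
            simp only [Set.mem_inter_iff, Set.mem_union]
            constructor
            · rintro ⟨hq | hq, hT⟩
              · exact Or.inl ⟨hq, hT⟩
              · exact Or.inr hq
            · rintro (⟨hq, hT⟩ | hq)
              · exact ⟨Or.inl hq, hT⟩
              · exact ⟨Or.inr hq, hCT hq⟩
          rw [if_pos hin, hinter, Set.ncard_union_eq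
            (Set.disjoint_left.2 fun p hp hpc => hCdisj p hpc hp.1)
            (st.1.finite_toSet.inter_of_left _) (compS_finite land n m (r, c0)), hsize]
          push_cast
          ring
        · have hCT0 : ∀ q ∈ compS land n m (r, c0), q ∉ Tset land n m (k : Int) := by
            intro q hq hT
            obtain ⟨x, hx⟩ := hT
            exact hin ((B5 (k : Int)).2 ⟨(x, (k : Int)),
              reach_trans land n m _ _ _ hq (reach_symm land n m _ _ hx), rfl⟩)
          have hinter : (((res.2.2 : Finset (Int × Int)) : Set (Int × Int)) ∩
              Tset land n m (k : Int)) =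
              ((↑st.1 : Set (Int × Int)) ∩ Tset land n m (k : Int)) := by
            rw [hset]
            ext q
            simp only [Set.mem_inter_iff, Set.mem_union]
            constructor
            · rintro ⟨hq | hq, hT⟩
              · exact ⟨hq, hT⟩
              · exact absurd hT (hCT0 q hq)
            · rintro ⟨hq, hT⟩
              exact ⟨Or.inl hq, hT⟩
          rw [if_neg hin, hinter]
          ring
      have hstep : (c0 :: cs).foldl (bodyB land n m fuel r) st =
          cs.foldl (bodyB land n m fuel r)
            (res.2.2, res.2.1.foldl (fun ct y => ct.set y.toNat (ct.getD y.toNat 0 + res.1)) st.2) := by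
        rw [List.foldl_cons, hbody]
      rw [hstep]
      obtain ⟨D1, D2, D3, D4, D5, D6⟩ := ih
        (res.2.2, res.2.1.foldl (fun ct y => ct.set y.toNat (ct.getD y.toNat 0 + res.1)) st.2)
        B2 B3 L1 hent'
      refine ⟨D1, D2, D3, D4, fun p hp => D5 (hVsub hp), ?_⟩
      intro c hcs hoil'
      rcases List.mem_cons.1 hcs with rfl | hcs
      · exact D5 ((B1 _).2 (Or.inr (Reach.refl _ hc.1)))
      · exact D6 c hcs hoil'
    · have hbody : bodyB land n m fuel r st c0 = st := by rw [bodyB, if_neg hc]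
      rw [List.foldl_cons, hbody]
      obtain ⟨D1, D2, D3, D4, D5, D6⟩ := ih st hcl hoil hlen hent
      refine ⟨D1, D2, D3, D4, D5, ?_⟩
      intro c hcs hoil'
      rcases List.mem_cons.1 hcs with rfl | hcs
      · have : (r, c) ∈ st.1 := by
          by_contra hnot
          exact hc ⟨hoil', hnot⟩
        exact D5 this
      · exact D6 c hcs hoil'
lemma outerB_run (land : List (List Int)) (n m : Int) (fuel : Nat)
    (hfuel : 2 * (oilF land n m).card + 1 ≤ fuel) (hm : 0 ≤ m) :
    ∀ (rows : List Int) (st : Finset (Int × Int) × List Int),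
    ClosedS land n m st.1 → (∀ c ∈ st.1, isOil land n m c) → st.2.length = m.toNat →
    (∀ k : Nat, k < m.toNat → st.2.getD k 0 =
      (((st.1 : Set (Int × Int)) ∩ Tset land n m (k : Int)).ncard : Int)) →
    ClosedS land n m (rows.foldl (fun st r =>
      (PySem.List.pyRange 0 m 1).foldl (bodyB land n m fuel r) st) st).1 ∧
    (∀ c ∈ (rows.foldl (fun st r =>
      (PySem.List.pyRange 0 m 1).foldl (bodyB land n m fuel r) st) st).1, isOil land n m c) ∧
    (rows.foldl (fun st r =>
      (PySem.List.pyRange 0 m 1).foldl (bodyB land n m fuel r) st) st).2.length = m.toNat ∧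
    (∀ k : Nat, k < m.toNat → (rows.foldl (fun st r =>
      (PySem.List.pyRange 0 m 1).foldl (bodyB land n m fuel r) st) st).2.getD k 0 =
      ((((rows.foldl (fun st r =>
        (PySem.List.pyRange 0 m 1).foldl (bodyB land n m fuel r) st) st).1 : Set (Int × Int)) ∩
        Tset land n m (k : Int)).ncard : Int)) ∧
    st.1 ⊆ (rows.foldl (fun st r =>
      (PySem.List.pyRange 0 m 1).foldl (bodyB land n m fuel r) st) st).1 ∧
    (∀ r ∈ rows, ∀ c : Int, 0 ≤ c → c < m → isOil land n m (r, c) → (r, c) ∈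
      (rows.foldl (fun st r =>
        (PySem.List.pyRange 0 m 1).foldl (bodyB land n m fuel r) st) st).1) := by
  intro rows
  induction rows with
  | nil =>
    intro st hcl hoil hlen hent
    exact ⟨hcl, hoil, hlen, hent, fun p hp => hp, by simp⟩
  | cons r0 rest ih =>
    intro st hcl hoil hlen hent
    rw [List.foldl_cons]
    obtain ⟨R1, R2, R3, R4, R5, R6⟩ :=
      rowB_run land n m fuel r0 hfuel hm (PySem.List.pyRange 0 m 1) st hcl hoil hlen hent
    obtain ⟨D1, D2, D3, D4, D5, D6⟩ :=
      ih ((PySem.List.pyRange 0 m 1).foldl (bodyB land n m fuel r0) st) R1 R2 R3 R4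
    refine ⟨D1, D2, D3, D4, fun p hp => D5 (R5 hp), ?_⟩
    intro r hr c hc0 hcm hoil'
    rcases List.mem_cons.1 hr with rfl | hr
    · exact D5 (R6 c (PySem.List.mem_pyRange_one.2 ⟨hc0, hcm⟩) hoil')
    · exact D6 r hr c hc0 hcm hoil'

lemma maxfold (m : Int) (f : Int → Int) (ct : List Int) (hlen : ct.length = m.toNat)
    (hent : ∀ k : Nat, k < m.toNat → ct.getD k 0 = f k) (hpos : ∀ j, 0 ≤ f j) :
    (PySem.List.pyRange 0 m 1).foldl (fun b j => max b (f j)) 0 =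
      (PySem.List.max? ct (fun x => x)).getD 0 := by
  by_cases hm : m ≤ 0
  · rw [PySem.List.pyRange_one_eq_nil hm]
    have hct : ct = [] := List.eq_nil_of_length_eq_zero (by omega)
    subst hct
    simp [PySem.List.max?]
  · have hm : 0 < m := by omega
    have hct : ct = (List.range m.toNat).map (fun k : Nat => f (k : Int)) := by
      refine List.ext_getElem (by simp [hlen]) ?_
      intro i h1 h2
      have hi : i < m.toNat := by simpa using h2
      rw [List.getElem_map, List.getElem_range]
      rw [← List.getD_eq_getElem ct 0 h1]
      exact hent i hi
    have hrange : PySem.List.pyRange 0 m 1 = (List.range m.toNat).map (fun k : Nat => (k : Int)) := by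
      rw [PySem.List.pyRange_one]
      simp
    rw [hrange, List.foldl_map]
    cases hR : List.range m.toNat with
    | nil => exfalso; have := List.length_range (n := m.toNat); rw [hR] at this; simp at this; omega
    | cons a t =>
      rw [hct, hR, List.map_cons, PySem.List.max?_id_cons, Option.getD_some, List.foldl_cons]
      rw [show max 0 (f (a : Int)) = f (a : Int) from max_eq_right (hpos _)]
      rw [List.foldl_map]
lemma fuel_ok (land : List (List Int)) :
    2 * (oilF land (land.length : Int) ((land.head?.getD []).length : Int)).card + 1 ≤
      2 * land.length * (land.head?.getD []).length + 2 := by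
  have h := card_oilF_le land (land.length : Int) ((land.head?.getD []).length : Int)
  simp only [Int.toNat_natCast] at h
  have h2 : 2 * land.length * (land.head?.getD []).length =
      2 * (land.length * (land.head?.getD []).length) := by ring
  omega

lemma solA_total (land : List (List Int)) :
    solution land = (PySem.List.pyRange 0 ((land.head?.getD []).length : Int) 1).foldl
      (fun b j => max b (((Tset land (land.length : Int)
        ((land.head?.getD []).length : Int) j).ncard : Int))) 0 := by
  show (PySem.List.pyRange 0 ((land.head?.getD []).length : Int) 1).foldl
      (fun best col =>
        max best ((PySem.List.pyRange 0 ((land.length : Nat) : Int) 1).foldl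
          (fun (st : Int × Finset (Int × Int)) row =>
            if cellOil land (land.length : Int) ((land.head?.getD []).length : Int) row col ∧
                (row, col) ∉ st.2 then
              let r := bfsA land (land.length : Int) ((land.head?.getD []).length : Int)
                (2 * land.length * (land.head?.getD []).length + 2) [(row, col)]
                (insert (row, col) st.2) 0
              (st.1 + r.1, r.2)
            else st) ((0 : Int), (∅ : Finset (Int × Int)))).1) 0 = _
  refine List.foldl_ext _ _ 0 ?_
  intro b col hcol
  rw [colA_total land (land.length : Int) ((land.head?.getD []).length : Int)
    (2 * land.length * (land.head?.getD []).length + 2) col (fuel_ok land)]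

lemma solB_total (land : List (List Int)) :
    solution_alt land = (PySem.List.pyRange 0 ((land.head?.getD []).length : Int) 1).foldl
      (fun b j => max b (((Tset land (land.length : Int)
        ((land.head?.getD []).length : Int) j).ncard : Int))) 0 := by
  have hm : (0 : Int) ≤ ((land.head?.getD []).length : Int) := by positivity
  obtain ⟨D1, D2, D3, D4, D5, D6⟩ := outerB_run land (land.length : Int)
    ((land.head?.getD []).length : Int) (2 * land.length * (land.head?.getD []).length + 2)
    (fuel_ok land) hm (PySem.List.pyRange 0 ((land.length : Nat) : Int) 1)
    ((∅ : Finset (Int × Int)), List.replicate (land.head?.getD []).length 0)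
    (fun c hc => absurd hc (Finset.notMem_empty c))
    (fun c hc => absurd hc (Finset.notMem_empty c))
    (by simp)
    (by
      intro k hk
      simp only [Finset.coe_empty, Set.empty_inter, Set.ncard_empty, Int.natCast_zero]
      rw [List.getD_eq_getElem _ 0 (by simpa using hk), List.getElem_replicate])
  set F := (PySem.List.pyRange 0 ((land.length : Nat) : Int) 1).foldl
    (fun st r => (PySem.List.pyRange 0 ((land.head?.getD []).length : Int) 1).foldl
      (bodyB land (land.length : Int) ((land.head?.getD []).length : Int)
        (2 * land.length * (land.head?.getD []).length + 2) r) st)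
    ((∅ : Finset (Int × Int)), List.replicate (land.head?.getD []).length 0) with hF
  have hset : ((F.1 : Finset (Int × Int)) : Set (Int × Int)) =
      {c | isOil land (land.length : Int) ((land.head?.getD []).length : Int) c} := by
    ext p
    simp only [Finset.mem_coe, Set.mem_setOf_eq]
    constructor
    · exact D2 p
    · intro hp
      have hb := oil_bounds land (land.length : Int) ((land.head?.getD []).length : Int) p hp
      exact D6 p.1 (PySem.List.mem_pyRange_one.2 ⟨hb.1, hb.2.1⟩) p.2 hb.2.2.1 hb.2.2.2 hp
  have hent : ∀ k : Nat, k < ((land.head?.getD []).length : Int).toNat →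
      F.2.getD k 0 = (((Tset land (land.length : Int)
        ((land.head?.getD []).length : Int) (k : Int)).ncard : Int)) := by
    intro k hk
    rw [D4 k hk]
    congr 2
    rw [hset]
    refine Set.inter_eq_right.2 ?_
    intro q hq
    obtain ⟨x, hx⟩ := hq
    exact reach_oil_right land (land.length : Int) ((land.head?.getD []).length : Int) _ _ hx
  have hmax := maxfold ((land.head?.getD []).length : Int)
    (fun j => ((Tset land (land.length : Int) ((land.head?.getD []).length : Int) j).ncard : Int))
    F.2 D3 hent (fun j => by positivity)
  rw [hmax]
  rfl

-- ===== VERDICT (by name: the statement is the Claim_ definition above) =====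
theorem solution_spec : Claim_equal_solution := by
  intro land _hdom _hpre
  show solution land = solution_alt land
  rw [solA_total, solB_total]
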